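-- pv_equiv track=rewrite | github.com/Aquaki/is-27 | PZ_6/pz_6_3.py | fix_ordered_list
-- ===== SOURCE A (Python) =====
-- def fix_ordered_list(lst):
--     # Проходим по списку, чтобы найти индекс первого элемента, который нарушает порядок
--     for i in range(len(lst) - 1):
--         # Если текущий элемент меньше следующего, значит порядок нарушен
--         if lst[i] < lst[i + 1]:
--             out_of_order_index = i + 1  # Сохраняем индекс элемента, который нарушает порядок
--             break
--     else:
--         return lst  # Если порядок не нарушен, возвращаем оригинальный список
--
--     out_of_order_element = lst[out_of_order_index]  # Извлекаем элемент, который нарушает порядок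
--
--     lst.pop(out_of_order_index) # Удаляем его из списка
--
--     # Находим правильную позицию для этого элемента в отсортированном списке
--     insert_index = 0
--     while insert_index < len(lst) and lst[insert_index] > out_of_order_element:
--         insert_index += 1  # Увеличиваем индекс, пока не найдем место для вставки
--
--     lst.insert(insert_index, out_of_order_element)  # Вставляем элемент на правильную позицию
--
--     return lst  # Возвращаем исправленный список
-- ===== SOURCE B (Python) =====
-- def fix_ordered_list(lst):
--     # Scan for the first index i with lst[i] < lst[i+1] (prefix lst[0..i] is non-increasing).
--     n = len(lst)
--     i = 0
--     while i < n - 1 and lst[i] >= lst[i + 1]: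
--         i += 1
--     if i >= n - 1:
--         return lst  # already non-increasing
--     x = lst.pop(i + 1)  # the out-of-order element
--     # Binary search in the non-increasing prefix lst[0:i+1] for the first
--     # position whose element is <= x (equals bisect_left on the negated prefix).
--     lo, hi = 0, i + 1
--     while lo < hi:
--         mid = (lo + hi) // 2
--         if lst[mid] > x:
--             lo = mid + 1
--         else:
--             hi = mid
--     lst.insert(lo, x)
--     return lst
-- ===== Notes on version B (the rewrite author's own statement) =====
-- stated objective: alternative
-- what changed: B locates the first violation with a plain while-scan and finds the reinsertion point by binary search over the non-increasing prefix instead of A's linear while-search over the whole popped list.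
import Mathlib
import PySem

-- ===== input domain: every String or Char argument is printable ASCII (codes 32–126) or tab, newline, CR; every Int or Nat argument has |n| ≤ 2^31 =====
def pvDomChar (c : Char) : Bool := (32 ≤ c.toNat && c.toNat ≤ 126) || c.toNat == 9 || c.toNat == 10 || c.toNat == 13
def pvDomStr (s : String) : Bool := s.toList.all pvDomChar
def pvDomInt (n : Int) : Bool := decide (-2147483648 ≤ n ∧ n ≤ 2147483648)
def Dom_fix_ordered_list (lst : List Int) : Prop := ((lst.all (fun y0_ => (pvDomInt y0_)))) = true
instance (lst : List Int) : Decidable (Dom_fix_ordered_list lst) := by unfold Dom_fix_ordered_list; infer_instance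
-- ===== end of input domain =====

-- B replaces A's linear insertion-point search by a binary search over the non-increasing
-- prefix (alternative algorithm, same asymptotic cost). Both Pythons mutate `lst` in place
-- the same way; the theorems below are about the returned value.

-- ===== PORT A =====
-- for i in range(len(lst)-1): if lst[i] < lst[i+1]: break → some (i+1); else → none
def fix_findA : List Int → Nat → Option Nat
  | a :: b :: t, i => if a < b then some (i + 1) else fix_findA (b :: t) (i + 1)
  | _, _ => none

-- while insert_index < len(lst) and lst[insert_index] > x: insert_index += 1
def fix_scanA (lst : List Int) (x : Int) : Nat :=
  match lst with
  | [] => 0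
  | a :: t => if a > x then fix_scanA t x + 1 else 0

def fix_ordered_list (lst : List Int) : List Int :=
  match fix_findA lst 0 with
  | none => lst                                         -- order not violated: return lst
  | some ooi =>
    let x := lst.getD ooi 0                             -- lst[ooi], index in range
    let lst2 := lst.take ooi ++ lst.drop (ooi + 1)      -- lst.pop(ooi), index in range: exact
    let idx := fix_scanA lst2 x
    lst2.take idx ++ x :: lst2.drop idx                 -- lst.insert(idx, x), 0 ≤ idx ≤ len: exact

-- ===== PORT B =====
-- while i < n - 1 and lst[i] >= lst[i+1]: i += 1
def fix_altScan : List Int → Nat → Nat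
  | a :: b :: t, i => if a ≥ b then fix_altScan (b :: t) (i + 1) else i
  | _, i => i

-- binary search: first position in [lo, hi) whose element is <= x.
-- The while loop runs on fuel = hi - lo, which strictly bounds its iteration count.
def fix_bsearchF (lst2 : List Int) (x : Int) : Nat → Nat → Nat → Nat
  | 0, lo, _ => lo
  | fuel + 1, lo, hi =>
    if lo < hi then
      -- mid = (lo + hi) // 2
      if lst2.getD ((lo + hi) / 2) 0 > x then fix_bsearchF lst2 x fuel ((lo + hi) / 2 + 1) hi   -- lst[mid], in range: exact
      else fix_bsearchF lst2 x fuel lo ((lo + hi) / 2)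
    else lo

def fix_bsearch (lst2 : List Int) (x : Int) (lo hi : Nat) : Nat :=
  fix_bsearchF lst2 x (hi - lo) lo hi

def fix_ordered_list_alt (lst : List Int) : List Int :=
  let i := fix_altScan lst 0
  if i ≥ lst.length - 1 then lst                        -- already non-increasing
  else
    let x := lst.getD (i + 1) 0                         -- lst.pop(i+1) value, index in range
    let lst2 := lst.take (i + 1) ++ lst.drop (i + 2)    -- lst.pop(i+1), index in range: exact
    let idx := fix_bsearch lst2 x 0 (i + 1)
    lst2.take idx ++ x :: lst2.drop idx                 -- lst.insert(idx, x): exact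

-- ===== PRECONDITION & SPEC =====
def Spec_fix_ordered_list (lst : List Int) (out : List Int) : Prop := out = fix_ordered_list_alt lst
instance (lst : List Int) (out : List Int) : Decidable (Spec_fix_ordered_list lst out) := by unfold Spec_fix_ordered_list; infer_instance

-- ===== CLAIM (what is proved, stated in full; the proofs are below) =====
def Claim_equal_fix_ordered_list : Prop := ∀ (lst : List Int), Dom_fix_ordered_list lst → Spec_fix_ordered_list lst (fix_ordered_list lst)

-- ===== LEMMAS AND PROOFS =====

-- A's for-else search, expressed through B's while-scan.
theorem find_eq (lst : List Int) : ∀ i : Nat,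
    fix_findA lst i =
      if fix_altScan lst i < i + (lst.length - 1) then some (fix_altScan lst i + 1) else none := by
  induction lst with
  | nil => intro i; simp [fix_findA, fix_altScan]
  | cons a t ih =>
    intro i
    cases t with
    | nil => simp [fix_findA, fix_altScan]
    | cons b t' =>
      by_cases h : a < b
      · have : ¬ a ≥ b := by omega
        simp [fix_findA, fix_altScan, h, this]
      · have h' : a ≥ b := by omega
        simp [fix_findA, fix_altScan, h, h', ih (i + 1)]
        rw [show i + 1 + t'.length = i + (t'.length + 1) from by omega]

theorem altScan_shift (lst : List Int) : ∀ i : Nat, fix_altScan lst i = fix_altScan lst 0 + i := by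
  induction lst with
  | nil => intro i; simp [fix_altScan]
  | cons a t ih =>
    intro i
    cases t with
    | nil => simp [fix_altScan]
    | cons b t' =>
      by_cases h : a ≥ b
      · simp [fix_altScan, h, ih (i+1), ih 1]; omega
      · simp [fix_altScan, h]

-- the prefix up to the scan index is non-increasing, and the scan stops at a strict rise
theorem altScan_spec (lst : List Int) :
    (∀ k, k < fix_altScan lst 0 → lst.getD (k + 1) 0 ≤ lst.getD k 0) ∧
    (fix_altScan lst 0 < lst.length - 1 →
      lst.getD (fix_altScan lst 0) 0 < lst.getD (fix_altScan lst 0 + 1) 0) := by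
  induction lst with
  | nil => simp [fix_altScan]
  | cons a t ih =>
    cases t with
    | nil => simp [fix_altScan]
    | cons b t' =>
      by_cases h : a ≥ b
      · have hsh : fix_altScan (a :: b :: t') 0 = fix_altScan (b :: t') 0 + 1 := by
          simp [fix_altScan, h, altScan_shift (b :: t') 1]
        refine ⟨?_, ?_⟩
        · intro k hk
          rw [hsh] at hk
          match k, hk with
          | 0, _ => simpa using h
          | (k' + 1), hk => simpa using ih.1 k' (by omega)
        · intro hlt
          rw [hsh] at hlt ⊢
          have hlt' : fix_altScan (b :: t') 0 < (b :: t').length - 1 := by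
            simp at hlt ⊢; omega
          simpa using ih.2 hlt'
      · have hsc : fix_altScan (a :: b :: t') 0 = 0 := by simp [fix_altScan, h]
        refine ⟨?_, ?_⟩
        · intro k hk; omega
        · intro _; rw [hsc]; simp; omega

-- the linear insertion-point scan: everything before the result is > x, the result element is ≤ x
theorem scanA_spec (x : Int) : ∀ lst2 : List Int,
    (∀ k, k < fix_scanA lst2 x → x < lst2.getD k 0) ∧
    fix_scanA lst2 x ≤ lst2.length ∧
    (fix_scanA lst2 x < lst2.length → lst2.getD (fix_scanA lst2 x) 0 ≤ x) := by
  intro lst2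
  induction lst2 with
  | nil => simp [fix_scanA]
  | cons a t ih =>
    by_cases h : a > x
    · refine ⟨?_, ?_, ?_⟩
      · intro k hk
        simp [fix_scanA, h] at hk
        match k, hk with
        | 0, _ => simpa using h
        | (k' + 1), hk => simpa using ih.1 k' (by omega)
      · simp [fix_scanA, h]; exact ih.2.1
      · intro hlt
        simp [fix_scanA, h] at hlt ⊢
        exact ih.2.2 (by omega)
    · refine ⟨?_, ?_, ?_⟩ <;> simp [fix_scanA, h]
      omega

-- binary search: on a range where (> x) is downward closed, it finds the first (≤ x) position
theorem bsearch_spec (lst2 : List Int) (x : Int) : ∀ n lo hi : Nat, hi - lo ≤ n →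
    (∀ a b : Nat, a ≤ b → b < hi → x < lst2.getD b 0 → x < lst2.getD a 0) → lo ≤ hi →
    lo ≤ fix_bsearchF lst2 x n lo hi ∧ fix_bsearchF lst2 x n lo hi ≤ hi ∧
    (∀ k, lo ≤ k → k < fix_bsearchF lst2 x n lo hi → x < lst2.getD k 0) ∧
    (fix_bsearchF lst2 x n lo hi = hi ∨ lst2.getD (fix_bsearchF lst2 x n lo hi) 0 ≤ x) := by
  intro n
  induction n with
  | zero =>
    intro lo hi hn hmono hle
    simp only [fix_bsearchF]
    refine ⟨le_refl _, hle, ?_, Or.inl (by omega)⟩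
    intro k h1 h2; omega
  | succ n ih =>
    intro lo hi hn hmono hle
    by_cases hlt : lo < hi
    · rw [fix_bsearchF, if_pos hlt]
      have hmid1 : lo ≤ (lo + hi) / 2 := by omega
      have hmid2 : (lo + hi) / 2 < hi := by omega
      by_cases hc : lst2.getD ((lo + hi) / 2) 0 > x
      · rw [if_pos hc]
        have h := ih ((lo + hi) / 2 + 1) hi (by omega) hmono (by omega)
        refine ⟨by omega, h.2.1, ?_, h.2.2.2⟩
        intro k h1 h2
        by_cases hk : k < (lo + hi) / 2 + 1
        · exact hmono k ((lo + hi) / 2) (by omega) hmid2 hc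
        · exact h.2.2.1 k (by omega) h2
      · rw [if_neg hc]
        have h := ih lo ((lo + hi) / 2) (by omega)
          (fun a b hab hb => hmono a b hab (by omega)) (by omega)
        refine ⟨h.1, by omega, h.2.2.1, ?_⟩
        rcases h.2.2.2 with heq | hle'
        · right; rw [heq]; omega
        · right; exact hle'
    · rw [fix_bsearchF, if_neg hlt]
      refine ⟨le_refl _, hle, ?_, Or.inl (by omega)⟩
      intro k h1 h2; omega

-- elements of the popped list at positions below the pop index are the original elements
theorem lst2_getD (lst : List Int) (j k : Nat) (hk : k ≤ j) (hj : j + 1 < lst.length) :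
    (lst.take (j + 1) ++ lst.drop (j + 2)).getD k 0 = lst.getD k 0 := by
  have h1 : k < (lst.take (j + 1)).length := by
    simp only [List.length_take]; omega
  rw [List.getD_append _ _ _ _ h1, List.getD_eq_getElem?_getD, List.getD_eq_getElem?_getD,
      List.getElem?_take, if_pos (by omega : k < j + 1)]

theorem main_eq (lst : List Int) : fix_ordered_list lst = fix_ordered_list_alt lst := by
  have hfe := find_eq lst 0
  rw [Nat.zero_add] at hfe
  unfold fix_ordered_list fix_ordered_list_alt
  by_cases h : fix_altScan lst 0 < lst.length - 1
  · rw [hfe, if_pos h, if_neg (by omega : ¬ fix_altScan lst 0 ≥ lst.length - 1)]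
    dsimp only
    rw [show fix_altScan lst 0 + 1 + 1 = fix_altScan lst 0 + 2 from by omega]
    set j := fix_altScan lst 0 with hj
    have hjlen : j + 1 < lst.length := by omega
    set x := lst.getD (j + 1) 0 with hx
    set lst2 := lst.take (j + 1) ++ lst.drop (j + 2) with hl2
    -- it suffices that the two insertion indices agree
    have hidx : fix_scanA lst2 x = fix_bsearch lst2 x 0 (j + 1) := by
      have hlen2 : lst2.length = lst.length - 1 := by
        rw [hl2]; simp [List.length_take, List.length_drop]; omega
      have hjlt2 : j < lst2.length := by omega
      -- non-increasing prefix, transferred to lst2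
      have hmonoL : ∀ a b : Nat, a ≤ b → b ≤ j → lst.getD b 0 ≤ lst.getD a 0 := by
        intro a b hab hbj
        have step : ∀ d c : Nat, c + d ≤ j → lst.getD (c + d) 0 ≤ lst.getD c 0 := by
          intro d
          induction d with
          | zero => intro c _; simp
          | succ d' ih =>
            intro c hc
            have h1 := (altScan_spec lst).1 (c + d') (by omega)
            have h2 := ih c (by omega)
            calc lst.getD (c + (d' + 1)) 0 = lst.getD ((c + d') + 1) 0 := by ring_nf
              _ ≤ lst.getD (c + d') 0 := h1
              _ ≤ lst.getD c 0 := h2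
        have := step (b - a) a (by omega)
        simpa [Nat.add_sub_cancel' hab] using this
      have hmono2 : ∀ a b : Nat, a ≤ b → b < j + 1 → x < lst2.getD b 0 → x < lst2.getD a 0 := by
        intro a b hab hb hxb
        rw [lst2_getD lst j b (by omega) hjlen] at hxb
        rw [lst2_getD lst j a (by omega) hjlen]
        exact lt_of_lt_of_le hxb (hmonoL a b hab (by omega))
      -- the element at index j of lst2 is < x
      have hjx : lst2.getD j 0 ≤ x := by
        rw [lst2_getD lst j j (le_refl _) hjlen]
        exact le_of_lt ((altScan_spec lst).2 h)
      have hs := scanA_spec x lst2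
      have hbe : fix_bsearch lst2 x 0 (j + 1) = fix_bsearchF lst2 x (j + 1 - 0) 0 (j + 1) := rfl
      have hb := bsearch_spec lst2 x (j + 1 - 0) 0 (j + 1) (by omega) hmono2 (by omega)
      rw [← hbe] at hb
      -- both indices are ≤ j
      have hsj : fix_scanA lst2 x ≤ j := by
        by_contra hc
        exact absurd (hs.1 j (by omega)) (not_lt.mpr hjx)
      have hbj : fix_bsearch lst2 x 0 (j + 1) ≤ j := by
        by_contra hc
        have : fix_bsearch lst2 x 0 (j + 1) = j + 1 := by omega
        exact absurd (hb.2.2.1 j (by omega) (by omega)) (not_lt.mpr hjx)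
      have hbv : lst2.getD (fix_bsearch lst2 x 0 (j + 1)) 0 ≤ x := by
        rcases hb.2.2.2 with heq | hv
        · omega
        · exact hv
      have hsv : lst2.getD (fix_scanA lst2 x) 0 ≤ x := hs.2.2 (by omega)
      by_contra hne
      rcases Nat.lt_or_ge (fix_scanA lst2 x) (fix_bsearch lst2 x 0 (j + 1)) with hlt | hge2
      · exact absurd hsv (not_le.mpr (hb.2.2.1 _ (by omega) hlt))
      · have hlt : fix_bsearch lst2 x 0 (j + 1) < fix_scanA lst2 x := by omega
        exact absurd hbv (not_le.mpr (hs.1 _ hlt))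
    rw [hidx]
  · rw [hfe, if_neg h, if_pos (by omega : fix_altScan lst 0 ≥ lst.length - 1)]

-- ===== VERDICT (by name: the statement is the Claim_ definition above) =====
theorem fix_ordered_list_spec : Claim_equal_fix_ordered_list := by
  intro lst _
  unfold Spec_fix_ordered_list
  exact main_eq lst
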